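/-
  THE CONFIG PART OF THE DECODER INVARIANT, AND ITS FINE DECODE-TIME FRAME LEMMA.

  `VorbisOK` = CONFIG ∧ MUTABLE.  CONFIG (`ConfigOK Blk mem f`) is everything `start_decoder` established and decode-time code never
  changes: Header (HD1–HD3), Comments (CM1–CM3), Codebooks (CB0 non-NULL ∧ every CodebookOK), Floors (FL1–FL10), FY1, Residues
  (R1–R8b), Mappings (MP1–MP6), Modes (MD1–MD2), M6 (the sample buffers as allocated blocks: their CONTENTS are free), the MDCT
  tables (M2–M4), the temp estimate T1. MUTABLE is `Bits` (S3, N1–N2, V1), W1, M7 (`previous_length`), and — in the arena layer — ADO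
  idle / busy: each decode-time function re-establishes the ones it stores to, from its own contract.

      ConfigOK.wins               the windows of `*f` CONFIG reads; inside both `decodeWins` and `objWins` (by `decide`)
      ConfigOK.Reads mem f        the blocks whose CONTENT it reads        ConfigOK.Owns mem f   the blocks its SHAPE clauses mention
      ConfigOK.transfer           THE two-address lemma of CONFIG (FRAME, TRANSPORT, "only `Blk` changed" are instances)
      ConfigOK.frame_decode       (hd : DecodeSame f mem mem') (hk : ∀ B, Reads mem f B → B.Kept mem mem') ⊢ ConfigOK Blk mem' f
      ConfigOK.frame              the same from `ObjSame` (an allocator call in between)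
      ConfigOK.reblk              only the block predicate changed (a frame was popped: `objBlock p` leaves `Blk`)
      ConfigOK.reads_blk          every block CONFIG reads is an allocated block
      ConfigOK.reads_back         the blocks read in the new state ARE the blocks read in the old one (pointers did not change)

  THE SEPARATION CLAUSE (design/INVARIANTS-errata.md E-3).  `Separated Blk mem f`: every block CONFIG reads is disjoint from `*f` and
  from every sample buffer (`SampleBuf`: `channel_buffers[c]`, `previous_window[c]`, `finalY[c]`), and these are disjoint from `*f`.
  "Two allocated blocks are equal or disjoint" does not give it (a configuration pointer could EQUAL a buffer pointer); the order
  of allocation does: `Separated.of_ne`. It is what makes "config blocks Kept" dischargeable for a store into a sample buffer.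

  THE LEMMA EVERY DECODE-TIME UNIT APPLIES ONCE PER BATCH OF STORES:
      ConfigOK.frame_stores (h : ConfigOK Blk mem f) (hok : BlkOK Blk) (hob : Blk (objBlock f)) (hsep : Separated Blk mem f)
          (hs : Mem.SameExcept spans mem mem')                       -- from the walker
          (hw : ∀ s, s ∈ spans → StoreOK Blk mem f s)                -- each span: a hole of `*f` | inside a sample buffer | off every block
          : ConfigOK Blk mem' f ∧ Separated Blk mem' f ∧ DecodeSame f mem mem'
-/
import Vorbis.Invariant.Laws
namespace Vorbis
open X86 X86.User Asan

/-! ### 1. CONFIG -/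

/-- **The CONFIG part of `VorbisOK`**: everything start_decoder established and decode-time code never changes. -/
structure ConfigOK (Blk : Block → Prop) (mem : Mem) (f : Nat) : Prop where
  /-- HD1 – HD3 -/
  header : HeaderOK mem f
  /-- CM1 – CM3 -/
  comment : CommentsOK Blk mem f
  /-- CB0 in its non-NULL form: F1, F2 -/
  cb0 : CodebooksOK Blk mem f
  /-- `codebooks ≠ NULL` -/
  nonnull : stb_vorbis.codebooks mem f ≠ 0
  /-- K1 – K6 of every codebook -/
  books : ∀ i : Nat, (i : Int) < stb_vorbis.codebook_count mem f → CodebookOK Blk mem (stb_vorbis.codebooks_at mem f i)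
  /-- FL1 – FL10 -/
  floor : FloorsOK Blk mem f
  /-- FY1 -/
  finalY : FY1 Blk mem f
  /-- R1 – R8b -/
  residue : ResidueOK Blk mem f
  /-- MP1 – MP6 -/
  mapping : MappingOK Blk mem f
  /-- MD1 – MD2 -/
  mode : ModeOK mem f
  /-- M6: the sample buffers are allocated blocks -/
  m6 : Mdct.M6OK Blk mem f
  /-- M2 – M4 -/
  mdct : Mdct.MdctOK Blk mem f
  /-- T1 -/
  temp : T1 mem f

/-- **The windows of `*f` that CONFIG reads**: `sample_rate`, `channels`; `temp_memory_required`; `vendor` … `comment_list`;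
`blocksize[2]` … `mode_config[64]`, `total_samples`, `channel_buffers[16]`; `previous_window[16]`; `finalY[16]`; `A[2]` …
`bit_reverse[2]`. None of them meets a decode-time hole or the two arena offsets. -/
def ConfigOK.wins : Wins := [(0, 8), (12, 16), (24, 48), (144, 1000), (1128, 1256), (1264, 1392), (1400, 1480)]

/-- CONFIG reads no decode-time hole. -/
theorem ConfigOK.wins_decode : WinsSub ConfigOK.wins decodeWins := by decide

/-- CONFIG reads neither `setup_offset` nor `temp_offset`. -/
theorem ConfigOK.wins_obj : WinsSub ConfigOK.wins objWins := by decide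

/-- **The blocks whose CONTENT the CONFIG part reads.** -/
inductive ConfigOK.Reads (mem : Mem) (f : Nat) : Block → Prop
  /-- the table of comment pointers (CM3) -/
  | comment {B : Block} (h : CommentsOK.Reads mem f B) : ConfigOK.Reads mem f B
  /-- the codebooks block: every field of every `Codebook` (K1 – K6; the class books of R7b; `entries` of R8a) -/
  | codebooks : ConfigOK.Reads mem f (codebooksBlock mem f)
  /-- the `sorted_values` block of a codebook with sorted tables (K4's sentinel, K4c) -/
  | sorted_values (i : Nat) (hi : (i : Int) < stb_vorbis.codebook_count mem f)
      (hse : 1 ≤ Codebook.sorted_entries mem (stb_vorbis.codebooks_at mem f i)) :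
      ConfigOK.Reads mem f (Codebook.svBlock mem (stb_vorbis.codebooks_at mem f i))
  /-- the `codeword_lengths` block of a codebook, `N(c)` bytes (K3): every decode through the book reads `codeword_lengths[x]`,
  the linear search a second time AFTER a store into `*f` — so the separation clause must cover it (`Separated.bookApart`) -/
  | lengths (i : Nat) (hi : (i : Int) < stb_vorbis.codebook_count mem f) :
      ConfigOK.Reads mem f (Codebook.clBlock mem (stb_vorbis.codebooks_at mem f i))
  /-- the floor block (FL3 – FL10; `values` of FY1) -/
  | floor : ConfigOK.Reads mem f (floorBlock mem f)
  /-- `residue_config`, every `residue_books`, `classdata`, row block (R3 – R8b; `begin`, `end`, `part_size` of T1) -/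
  | residue {B : Block} (h : ResidueOK.Owns mem f B) : ConfigOK.Reads mem f B
  /-- the mapping table and every `chan` block (MP2 – MP6) -/
  | mapping {B : Block} (h : MappingOK.Owns mem f B) : ConfigOK.Reads mem f B
  /-- the two bit-reverse tables (M4) -/
  | mdct {B : Block} (h : Mdct.MdctOK.Reads mem f B) : ConfigOK.Reads mem f B

/-- **The blocks the SHAPE clauses of the CONFIG part mention.** -/
inductive ConfigOK.Owns (mem : Mem) (f : Nat) : Block → Prop
  /-- vendor, the comment table, every comment -/
  | comment {B : Block} (h : CommentsOK.Owns mem f B) : ConfigOK.Owns mem f B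
  /-- the codebooks block -/
  | codebooks {B : Block} (h : CodebooksOK.Owns mem f B) : ConfigOK.Owns mem f B
  /-- the tables of codebook `i` -/
  | book (i : Nat) (hi : (i : Int) < stb_vorbis.codebook_count mem f) {B : Block}
      (h : CodebookOK.Owns mem (stb_vorbis.codebooks_at mem f i) B) : ConfigOK.Owns mem f B
  /-- the floor block -/
  | floor {B : Block} (h : FloorsOK.Owns mem f B) : ConfigOK.Owns mem f B
  /-- the `finalY` blocks -/
  | finalY {B : Block} (h : FY1.Owns mem f B) : ConfigOK.Owns mem f B
  /-- the residue blocks -/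
  | residue {B : Block} (h : ResidueOK.Owns mem f B) : ConfigOK.Owns mem f B
  /-- the mapping blocks -/
  | mapping {B : Block} (h : MappingOK.Owns mem f B) : ConfigOK.Owns mem f B
  /-- the channel buffers and previous windows -/
  | buffers {B : Block} (h : Mdct.M6OK.Owns mem f B) : ConfigOK.Owns mem f B
  /-- the ten MDCT tables -/
  | mdct {B : Block} (h : Mdct.MdctOK.Owns mem f B) : ConfigOK.Owns mem f B

namespace ConfigOK
variable {Blk Blk' : Block → Prop} {mem mem' : Mem} {p f : Nat}

/-- **Every block CONFIG reads is an allocated block.** -/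
theorem reads_blk (h : ConfigOK Blk mem f) {B : Block} (hR : ConfigOK.Reads mem f B) : Blk B := by
  cases hR with
  | comment hc => exact h.comment.reads_blk hc
  | codebooks => exact h.cb0.F2
  | sorted_values i hi hse => exact (h.books i hi).K4.sv hse
  | lengths i hi => exact (h.books i hi).lengths_block
  | floor => exact h.floor.FL2
  | residue ho => exact h.residue.owns_blk ho
  | mapping ho => exact h.mapping.owns_blk ho
  | mdct hr => exact h.mdct.reads_blk hr

/-- The pointer `codebooks` and the count are the same in the two states. -/
theorem codebooks_eq (he : ObjEq ConfigOK.wins mem p mem' f) :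
    stb_vorbis.codebooks mem' f = stb_vorbis.codebooks mem p ∧
      stb_vorbis.codebook_count mem' f = stb_vorbis.codebook_count mem p := by
  constructor
  · simp only [vacc, voff]
    exact he.u64 168 (by decide)
  · simp only [vacc, voff]
    exact he.i32 160 (by decide)

/-- **THE TWO-ADDRESS LEMMA OF THE CONFIG PART**: the windows `ConfigOK.wins` of `(mem', f)` read as those of `(mem, p)`, every block
whose content CONFIG reads is kept, every owned block is still allocated ⊢ `ConfigOK Blk mem p → ConfigOK Blk' mem' f`. -/
theorem transfer (h : ConfigOK Blk mem p) (he : ObjEq ConfigOK.wins mem p mem' f)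
    (hk : ∀ B, ConfigOK.Reads mem p B → B.Kept mem mem')
    (hB : ∀ B, ConfigOK.Owns mem p B → Blk B → Blk' B) : ConfigOK Blk' mem' f := by
  obtain ⟨ecbs, ecnt⟩ := codebooks_eq he
  have hC : stb_vorbis.channels mem p ≤ 16 := h.header.HD1.2
  have hcbk := hk _ ConfigOK.Reads.codebooks
  refine ⟨?_, ?_, ?_, ?_, ?_, ?_, ?_, ?_, ?_, ?_, ?_, ?_, ?_⟩
  · exact h.header.transfer (he.sub (by decide))
  · exact h.comment.transfer (he.sub (by decide)) (fun B hR => hk B (.comment hR)) (fun B hO hb => hB B (.comment hO) hb)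
  · exact h.cb0.transfer (he.sub (by decide)) (fun B hO hb => hB B (.codebooks hO) hb)
  · rw [ecbs]
    exact h.nonnull
  · intro i hi
    rw [ecnt] at hi
    have e : stb_vorbis.codebooks_at mem' f i = stb_vorbis.codebooks_at mem p i := by
      simp only [stb_vorbis.codebooks_at]
      rw [ecbs]
    rw [e]
    apply (h.books i hi).transfer
    · exact h.cb0.cb_kept hcbk i hi
    · intro hse
      exact hk _ (ConfigOK.Reads.sorted_values i hi hse)
    · intro B hO hb
      exact hB B (.book i hi hO) hb
  · exact h.floor.transfer (he.sub (by decide))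
      (fun B hR => by
        cases hR with
        | config => exact hk _ ConfigOK.Reads.floor)
      (fun B hO hb => hB B (.floor hO) hb)
  · exact h.finalY.transfer h.floor.toFloorShape hC (he.sub (by decide))
      (fun B hR => by
        cases hR with
        | config => exact hk _ ConfigOK.Reads.floor)
      (fun B hO hb => hB B (.finalY hO) hb)
  · apply h.residue.transfer (he.sub (by decide))
    · intro B hR
      cases hR with
      | owns ho => exact hk B (.residue ho)
      | codebooks => exact hcbk
    · intro B hO hb
      exact hB B (.residue hO) hb
  · exact h.mapping.transfer (he.sub (by decide)) (fun B hR => hk B (.mapping hR)) (fun B hO hb => hB B (.mapping hO) hb)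
  · exact h.mode.transfer (he.sub (by decide))
  · exact h.m6.transfer (he.sub (by decide)) hC (fun B hO hb => hB B (.buffers hO) hb)
  · exact h.mdct.transfer (he.sub (by decide)) (fun B hR => hk B (.mdct hR)) (fun B hO hb => hB B (.mdct hO) hb)
  · exact h.temp.transfer (he.sub (by decide)) h.residue.R1.2 (fun B hR => hk B (.residue (T1.Reads.owned hR)))

/-- **THE FINE DECODE-TIME FRAME LEMMA**: `*f` is the same except the decode-time holes, the blocks CONFIG reads are kept ⊢ the
CONFIG part holds in the new memory. -/
theorem frame_decode (h : ConfigOK Blk mem f) (hd : DecodeSame f mem mem')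
    (hk : ∀ B, ConfigOK.Reads mem f B → B.Kept mem mem') : ConfigOK Blk mem' f :=
  h.transfer (hd.sub wins_decode) hk (fun _ _ hb => hb)

/-- **FRAME over an allocator call**: `*f` is the same except `setup_offset` / `temp_offset`. -/
theorem frame (h : ConfigOK Blk mem f) (hs : ObjSame f mem mem')
    (hk : ∀ B, ConfigOK.Reads mem f B → B.Kept mem mem') : ConfigOK Blk mem' f :=
  h.transfer (hs.sub wins_obj) hk (fun _ _ hb => hb)

/-- The coarse frame: every allocated block (the object among them) is kept. -/
theorem carry (h : ConfigOK Blk mem f) (hall : AllKept Blk mem mem') (hob : Blk (objBlock f)) : ConfigOK Blk mem' f :=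
  h.transfer (ObjEq.of_kept_obj (hall _ hob) (by decide)) (fun _ hR => hall _ (h.reads_blk hR)) (fun _ _ hb => hb)

/-- **Only the block predicate changed** (a frame was popped and its objects left `Blk`; the arena grew): the owned blocks are
still allocated. -/
theorem reblk (h : ConfigOK Blk mem f) (hok : BlkOK Blk) (hB : ∀ B, ConfigOK.Owns mem f B → Blk B → Blk' B) :
    ConfigOK Blk' mem f :=
  h.transfer (ObjEq.refl _ _ _) (fun B hR => Block.Kept.refl mem B (hok.no_wrap (h.reads_blk hR))) hB

end ConfigOK

end Vorbis
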